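-- pv_equiv track=rewrite | github.com/BlocUnited-LLC/mozaiks-core | runtime/ai/core/entitlements/loader.py | validate_tier_inheritance
-- ===== SOURCE A (Python) =====
-- from typing import Optional, Dict, Any, Set
--
-- def validate_tier_inheritance(config: Dict[str, Any]) -> bool:
--     """
--     Validate that tier inheritance has no circular references.
--
--     Args:
--         config: Entitlements config
--
--     Returns:
--         True if inheritance is valid, False if circular
--     """
--     tiers = config.get("tiers", {})
--
--     def has_cycle(tier_name: str, visited: Set[str]) -> bool:
--         if tier_name in visited:
--             return True
--         if tier_name not in tiers:
--             return False
--
--         visited.add(tier_name)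
--         tier_config = tiers[tier_name]
--         parent = tier_config.get("inherits")
--
--         if parent:
--             return has_cycle(parent, visited)
--         return False
--
--     for tier_name in tiers:
--         if has_cycle(tier_name, set()):
--             return False
--
--     return True
-- ===== SOURCE B (Python) =====
-- def validate_tier_inheritance(config):
--     """Cycle check by fixpoint elimination (Kahn-style on the parent function):
--     repeatedly discard tiers whose parent is already known safe (falsy, missing,
--     or no longer pending); a cycle exists iff some tiers can never be discarded."""
--     tiers = config.get("tiers", {})
--     pending = set(tiers)
--     changed = True
--     while changed:
--         changed = False
--         for name in list(pending):
--             parent = tiers[name].get("inherits")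
--             if not parent or parent not in pending:
--                 pending.discard(name)
--                 changed = True
--     return not pending
-- ===== Notes on version B (the rewrite author's own statement) =====
-- stated objective: alternative
-- what changed: A runs a fresh recursive chain-walk (DFS with a per-start visited set) from every tier; B instead computes the set of cyclic tiers by Kahn-style fixpoint elimination: repeatedly discard pending tiers whose parent is falsy, unknown or already discarded, and report a cycle iff tiers remain pending.
import Mathlib
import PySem

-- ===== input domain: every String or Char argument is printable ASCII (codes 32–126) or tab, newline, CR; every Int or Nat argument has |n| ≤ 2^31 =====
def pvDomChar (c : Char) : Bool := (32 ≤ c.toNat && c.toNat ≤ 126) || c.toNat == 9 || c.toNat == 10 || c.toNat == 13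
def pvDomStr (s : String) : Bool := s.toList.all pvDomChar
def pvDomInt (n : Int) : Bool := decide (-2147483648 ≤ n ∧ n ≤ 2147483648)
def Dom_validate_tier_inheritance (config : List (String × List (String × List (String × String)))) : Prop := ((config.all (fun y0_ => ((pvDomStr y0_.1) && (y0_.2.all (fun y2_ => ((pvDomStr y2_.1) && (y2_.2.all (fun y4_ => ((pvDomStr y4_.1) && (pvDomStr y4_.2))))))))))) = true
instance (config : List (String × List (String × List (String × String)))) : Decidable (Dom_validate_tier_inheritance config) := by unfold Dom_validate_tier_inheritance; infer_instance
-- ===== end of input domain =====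

-- B replaces A's per-tier recursive chain walk by Kahn-style fixpoint elimination:
-- repeatedly discard tiers whose parent is already known safe; equal return value
-- proved on the whole domain ('alternative': a different algorithm, no speed claim).

-- ===== PORT A =====
-- A's inner has_cycle(tier_name, visited); fuel = number of tier keys + 1 is a totality
-- device only: each recursive call adds a fresh tiers-key to visited, so fuel never runs out.
def pvHasCycleA (tiers : List (String × List (String × String))) : Nat → String → PySem.Set String → Bool
  | 0, _, _ => false
  | fuel+1, t, visited =>
    if visited.contains t then true
    else
      match (PySem.Dict.mk tiers).get? t with
      | none => false
      | some tier_config =>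
        let visited' := PySem.Set.add visited t
        match (PySem.Dict.mk tier_config).get? "inherits" with
        | some parent => if parent ≠ "" then pvHasCycleA tiers fuel parent visited' else false
        | none => false

-- A's 'for tier_name in tiers: if has_cycle(...): return False' loop
def pvLoopA (tiers : List (String × List (String × String))) (fuel : Nat) : List String → Bool
  | [] => true
  | t :: rest => if pvHasCycleA tiers fuel t PySem.Set.empty then false else pvLoopA tiers fuel rest

def validate_tier_inheritance (config : List (String × List (String × List (String × String)))) : Bool :=
  let tiers := (PySem.Dict.mk config).getD "tiers" []
  let keys := (PySem.Dict.mk tiers).keys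
  pvLoopA tiers (keys.length + 1) keys

-- ===== PORT B =====
-- B's inner 'for name in list(pending)' pass: scan the snapshot, discarding every name
-- whose parent is falsy, unknown or no longer pending; 'changed' records any discard.
def pvRoundB (tiers : List (String × List (String × String))) :
    List String → PySem.Set String → Bool → PySem.Set String × Bool
  | [], pending, changed => (pending, changed)
  | name :: rest, pending, changed =>
    match (PySem.Dict.mk tiers).get? name with
    | none => pvRoundB tiers rest pending changed   -- unreachable: pending only ever holds tier keys
    | some cfg =>
      match (PySem.Dict.mk cfg).get? "inherits" with
      | none => pvRoundB tiers rest (PySem.Set.discard pending name) true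
      | some parent =>
        if parent = "" ∨ pending.contains parent = false then
          pvRoundB tiers rest (PySem.Set.discard pending name) true
        else
          pvRoundB tiers rest pending changed

-- B's 'while changed' loop; fuel = |pending| + 1 is a totality device only: every round
-- before the fixpoint discards at least one element, so fuel never runs out.
def pvFixB (tiers : List (String × List (String × String))) : Nat → PySem.Set String → PySem.Set String
  | 0, pending => pending
  | fuel+1, pending =>
    match pvRoundB tiers pending pending false with
    | (pending', true) => pvFixB tiers fuel pending'
    | (pending', false) => pending'

def validate_tier_inheritance_alt (config : List (String × List (String × List (String × String)))) : Bool :=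
  let tiers := (PySem.Dict.mk config).getD "tiers" []
  let pending := PySem.Set.ofList (PySem.Dict.mk tiers).keys
  (pvFixB tiers (pending.length + 1) pending).isEmpty

-- ===== PRECONDITION & SPEC =====
def Spec_validate_tier_inheritance (config : List (String × List (String × List (String × String)))) (out : Bool) : Prop := out = validate_tier_inheritance_alt config
instance (config : List (String × List (String × List (String × String)))) (out : Bool) : Decidable (Spec_validate_tier_inheritance config out) := by unfold Spec_validate_tier_inheritance; infer_instance

-- ===== CLAIM (what is proved, stated in full; the proofs are below) =====
def Claim_equal_validate_tier_inheritance : Prop := ∀ (config : List (String × List (String × List (String × String)))), Dom_validate_tier_inheritance config → Spec_validate_tier_inheritance config (validate_tier_inheritance config)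

-- ===== LEMMAS AND PROOFS =====

-- the one inheritance step both programs take: the parent of t, if t is a tier with a truthy 'inherits'
def pvStep (tiers : List (String × List (String × String))) (t : String) : Option String :=
  match (PySem.Dict.mk tiers).get? t with
  | none => none
  | some cfg =>
    match (PySem.Dict.mk cfg).get? "inherits" with
    | some p => if p ≠ "" then some p else none
    | none => none

-- the node reached after n steps (none = the chain has halted by then)
def pvReach (tiers : List (String × List (String × String))) : Nat → String → Option String
  | 0, t => some t
  | n+1, t =>
    match pvStep tiers t with
    | none => none
    | some q => pvReach tiers n q

-- the chain from t halts
def pvTerm (tiers : List (String × List (String × String))) (t : String) : Prop :=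
  ∃ n, pvReach tiers n t = none

lemma pvReach_add (tiers : List (String × List (String × String))) :
    ∀ i j t, pvReach tiers (i + j) t =
      match pvReach tiers i t with
      | none => none
      | some u => pvReach tiers j u := by
  intro i
  induction i with
  | zero => intro j t; simp [pvReach]
  | succ i ih =>
    intro j t
    have : i + 1 + j = (i + j) + 1 := by omega
    rw [this]
    simp only [pvReach]
    cases h : pvStep tiers t with
    | none => simp
    | some q => simp [ih j q]

lemma pvReach_none_mono (tiers : List (String × List (String × String))) :
    ∀ n m t, pvReach tiers n t = none → n ≤ m → pvReach tiers m t = none := by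
  intro n m t hn hle
  obtain ⟨k, rfl⟩ := Nat.exists_eq_add_of_le hle
  have := pvReach_add tiers n k t
  rw [hn] at this
  exact this

lemma pvNoRepeat (tiers : List (String × List (String × String))) (t u : String) (i d : Nat)
    (hi : pvReach tiers i t = some u) (hd : 0 < d) (hc : pvReach tiers d u = some u) :
    ¬ pvTerm tiers t := by
  rintro ⟨n, hn⟩
  have hcyc : ∀ k : Nat, pvReach tiers (i + k * d) t = some u := by
    intro k
    induction k with
    | zero =>
      simpa using hi
    | succ k ih =>
      have : i + (k + 1) * d = (i + k * d) + d := by ring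
      rw [this, pvReach_add tiers (i + k * d) d t, ih]
      simpa using hc
  have hle : n ≤ i + n * d := by
    have := Nat.le_mul_of_pos_right n hd
    omega
  have := pvReach_none_mono tiers n (i + n * d) t hn hle
  rw [hcyc n] at this
  exact absurd this (by simp)

lemma pvTerm_back (tiers : List (String × List (String × String))) {t q : String}
    (h : pvStep tiers t = some q) (hq : pvTerm tiers q) : pvTerm tiers t := by
  obtain ⟨n, hn⟩ := hq
  exact ⟨n + 1, by simp [pvReach, h, hn]⟩

lemma pvTerm_of_step_none (tiers : List (String × List (String × String))) {t : String}
    (h : pvStep tiers t = none) : pvTerm tiers t := by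
  exact ⟨1, by simp [pvReach, h]⟩

lemma pvMem_keys_of_get? (tiers : List (String × List (String × String))) {t : String} {cfg : List (String × String)}
    (h : (PySem.Dict.mk tiers).get? t = some cfg) : t ∈ (PySem.Dict.mk tiers).keys := by
  by_contra hmem
  rw [← PySem.Dict.get?_eq_none_iff_not_mem_keys] at hmem
  simp [hmem] at h

lemma pvStep_mem_keys (tiers : List (String × List (String × String))) {t q : String}
    (h : pvStep tiers t = some q) : t ∈ (PySem.Dict.mk tiers).keys := by
  unfold pvStep at h
  cases hg : (PySem.Dict.mk tiers).get? t with
  | none => rw [hg] at h; simp at h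
  | some cfg => exact pvMem_keys_of_get? tiers hg

lemma pvContains_eq_false_iff (s : PySem.Set String) (x : String) : PySem.Set.contains s x = false ↔ x ∉ s := by
  rw [← PySem.Set.contains_iff]
  cases PySem.Set.contains s x <;> simp

-- A side --------------------------------------------------------------------

lemma pvA_false_term (tiers : List (String × List (String × String))) :
    ∀ fuel (v : PySem.Set String) t, v.Nodup → (∀ x ∈ v, x ∈ (PySem.Dict.mk tiers).keys) →
      (PySem.Dict.mk tiers).keys.length < fuel + v.length →
      pvHasCycleA tiers fuel t v = false → pvTerm tiers t := by
  intro fuel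
  induction fuel with
  | zero =>
    intro v t hnd hsub hlen _
    exact absurd ((List.subperm_of_subset hnd (fun x hx => hsub x hx)).length_le) (by omega)
  | succ fuel ih =>
    intro v t hnd hsub hlen hfalse
    by_cases hm : t ∈ v
    · simp [pvHasCycleA, hm] at hfalse
    · cases hg : (PySem.Dict.mk tiers).get? t with
      | none => exact pvTerm_of_step_none tiers (by simp [pvStep, hg])
      | some cfg =>
        cases hp : (PySem.Dict.mk cfg).get? "inherits" with
        | none => exact pvTerm_of_step_none tiers (by simp [pvStep, hg, hp])
        | some p =>
          by_cases hpe : p = ""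
          · exact pvTerm_of_step_none tiers (by simp [pvStep, hg, hp, hpe])
          · have hrec : pvHasCycleA tiers fuel p (PySem.Set.add v t) = false := by
              simpa [pvHasCycleA, hm, hg, hp, hpe] using hfalse
            have hadd : PySem.Set.add v t = v ++ [t] := PySem.Set.add_of_not_mem hm
            have htk : t ∈ (PySem.Dict.mk tiers).keys := pvMem_keys_of_get? tiers hg
            have hterm_p : pvTerm tiers p := by
              refine ih (PySem.Set.add v t) p ?_ ?_ ?_ hrec
              · rw [hadd]
                simp [List.nodup_append, hnd]
                intro a ha rfl
                exact hm ha
              · rw [hadd]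
                intro x hx
                rcases List.mem_append.1 hx with hx | hx
                · exact hsub x hx
                · simp at hx; subst hx; exact htk
              · rw [hadd, List.length_append]
                simp only [List.length_singleton]
                omega
            exact pvTerm_back tiers (show pvStep tiers t = some p by simp [pvStep, hg, hp, hpe]) hterm_p

lemma pvA_term_false (tiers : List (String × List (String × String))) :
    ∀ n fuel t (v : PySem.Set String), pvReach tiers n t = none → n ≤ fuel →
      (∀ i u, pvReach tiers i t = some u → v.contains u = false) →
      pvHasCycleA tiers fuel t v = false := by
  intro n
  induction n with
  | zero => intro fuel t v h0 _ _; simp [pvReach] at h0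
  | succ n ih =>
    intro fuel t v hreach hfe hv
    cases fuel with
    | zero => omega
    | succ f =>
      have hct : v.contains t = false := hv 0 t (by simp [pvReach])
      have hm : t ∉ v := (pvContains_eq_false_iff v t).1 hct
      cases hg : (PySem.Dict.mk tiers).get? t with
      | none => simp [pvHasCycleA, hm, hg]
      | some cfg =>
        cases hp : (PySem.Dict.mk cfg).get? "inherits" with
        | none => simp [pvHasCycleA, hm, hg, hp]
        | some p =>
          by_cases hpe : p = ""
          · simp [pvHasCycleA, hm, hg, hp, hpe]
          · have hstep : pvStep tiers t = some p := by simp [pvStep, hg, hp, hpe]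
            have hreach' : pvReach tiers n p = none := by
              simpa [pvReach, hstep] using hreach
            have hterm : pvTerm tiers t := ⟨n + 1, hreach⟩
            have hv' : ∀ i u, pvReach tiers i p = some u → (PySem.Set.add v t).contains u = false := by
              intro i u hiu
              have hiu' : pvReach tiers (i + 1) t = some u := by
                simp [pvReach, hstep, hiu]
              have h1 : v.contains u = false := hv (i + 1) u hiu'
              have hut : u ≠ t := by
                intro heq
                rw [heq] at hiu'
                exact pvNoRepeat tiers t t 0 (i + 1) (by simp [pvReach]) (by omega) hiu' hterm
              rw [PySem.Set.add_of_not_mem hm, pvContains_eq_false_iff]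
              intro hm
              rcases List.mem_append.1 hm with hm | hm
              · exact absurd hm ((pvContains_eq_false_iff v u).1 h1)
              · simp at hm; exact hut hm
            have : pvHasCycleA tiers (f + 1) t v = pvHasCycleA tiers f p (PySem.Set.add v t) := by
              simp [pvHasCycleA, hm, hg, hp, hpe]
            rw [this]
            exact ih f p (PySem.Set.add v t) hreach' (by omega) hv'

lemma pvTerm_bound (tiers : List (String × List (String × String))) (t : String)
    (h : pvTerm tiers t) : pvReach tiers ((PySem.Dict.mk tiers).keys.length + 1) t = none := by
  set K := (PySem.Dict.mk tiers).keys.length with hK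
  by_contra hne
  have hsome : ∀ i, i ≤ K + 1 → ∃ w, pvReach tiers i t = some w := by
    intro i hi
    cases hri : pvReach tiers i t with
    | none => exact absurd (pvReach_none_mono tiers i (K + 1) t hri hi) hne
    | some w => exact ⟨w, rfl⟩
  have hinj : ∀ i ∈ List.range (K + 1), ∀ j ∈ List.range (K + 1),
      (pvReach tiers i t).getD "" = (pvReach tiers j t).getD "" → i = j := by
    intro i hi j hj heq
    simp [List.mem_range] at hi hj
    by_contra hne'
    rcases Nat.lt_or_ge i j with hlt | hge
    · obtain ⟨u, hu⟩ := hsome i (by omega)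
      obtain ⟨w, hw⟩ := hsome j (by omega)
      rw [hu, hw] at heq; simp at heq; subst heq
      have hadd := pvReach_add tiers i (j - i) t
      rw [hu] at hadd
      simp only [] at hadd
      have : i + (j - i) = j := by omega
      rw [this, hw] at hadd
      exact pvNoRepeat tiers t u i (j - i) hu (by omega) hadd.symm h
    · have hlt : j < i := by omega
      obtain ⟨u, hu⟩ := hsome j (by omega)
      obtain ⟨w, hw⟩ := hsome i (by omega)
      rw [hu, hw] at heq; simp at heq
      rw [heq] at hw
      have hadd := pvReach_add tiers j (i - j) t
      rw [hu] at hadd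
      simp only [] at hadd
      have hji : j + (i - j) = i := by omega
      rw [hji, hw] at hadd
      exact pvNoRepeat tiers t u j (i - j) hu (by omega) hadd.symm h
  have hnd : ((List.range (K + 1)).map (fun i => (pvReach tiers i t).getD "")).Nodup :=
    List.Nodup.map_on hinj (List.nodup_range)
  have hsub : ∀ x ∈ (List.range (K + 1)).map (fun i => (pvReach tiers i t).getD ""),
      x ∈ (PySem.Dict.mk tiers).keys := by
    intro x hx
    rcases List.mem_map.1 hx with ⟨i, hi, rfl⟩
    simp [List.mem_range] at hi
    obtain ⟨u, hu⟩ := hsome i (by omega)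
    obtain ⟨w, hw⟩ := hsome (i + 1) (by omega)
    have hadd := pvReach_add tiers i 1 t
    rw [hu] at hadd
    simp only [] at hadd
    rw [hw] at hadd
    have hstep : ∃ q, pvStep tiers u = some q := by
      cases hs : pvStep tiers u with
      | none => rw [show (1 : Nat) = 0 + 1 from rfl] at hadd; simp [pvReach, hs] at hadd
      | some q => exact ⟨q, rfl⟩
    obtain ⟨q, hq⟩ := hstep
    rw [hu]
    exact pvStep_mem_keys tiers hq
  have := (List.subperm_of_subset hnd (fun x hx => hsub x hx)).length_le
  simp at this
  have hkl : (PySem.Dict.mk tiers).keys.length = tiers.length := by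
    simp [PySem.Dict.keys]
  omega

lemma pvA_char (tiers : List (String × List (String × String))) (t : String) :
    pvHasCycleA tiers ((PySem.Dict.mk tiers).keys.length + 1) t PySem.Set.empty = false ↔ pvTerm tiers t := by
  constructor
  · intro hf
    exact pvA_false_term tiers ((PySem.Dict.mk tiers).keys.length + 1) PySem.Set.empty t
      (by simp [PySem.Set.empty]) (by simp [PySem.Set.empty]) (by simp [PySem.Set.empty]) hf
  · intro ht
    exact pvA_term_false tiers ((PySem.Dict.mk tiers).keys.length + 1)
      ((PySem.Dict.mk tiers).keys.length + 1) t PySem.Set.empty (pvTerm_bound tiers t ht) (le_refl _)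
      (fun i u _ => by simp [PySem.Set.empty])

lemma pvLoopA_char (tiers : List (String × List (String × String))) :
    ∀ ks, pvLoopA tiers ((PySem.Dict.mk tiers).keys.length + 1) ks = true ↔ ∀ k ∈ ks, pvTerm tiers k := by
  intro ks
  induction ks with
  | nil => simp [pvLoopA]
  | cons t rest ih =>
    simp only [pvLoopA]
    cases hc : pvHasCycleA tiers ((PySem.Dict.mk tiers).keys.length + 1) t PySem.Set.empty with
    | true =>
      have hnt : ¬ pvTerm tiers t := fun ht => by
        have := (pvA_char tiers t).2 ht
        rw [this] at hc
        exact absurd hc (by simp)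
      rw [if_pos rfl]
      constructor
      · intro h; exact absurd h (by simp)
      · intro hall; exact absurd (hall t (List.mem_cons_self)) hnt
    | false =>
      have ht : pvTerm tiers t := (pvA_char tiers t).1 hc
      rw [if_neg (by simp), ih]
      constructor
      · intro hall k hk
        rcases List.mem_cons.1 hk with rfl | hk
        · exact ht
        · exact hall k hk
      · intro hall k hk
        exact hall k (List.mem_cons_of_mem _ hk)

-- B side --------------------------------------------------------------------

lemma pvDiscard_sublist (s : PySem.Set String) (x : String) :
    List.Sublist (PySem.Set.discard s x) s := by
  simp only [PySem.Set.discard]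
  exact List.filter_sublist

lemma pvDiscard_length_lt (s : PySem.Set String) (x : String) (hx : x ∈ s) :
    (PySem.Set.discard s x).length < s.length := by
  have hsub := pvDiscard_sublist s x
  rcases Nat.lt_or_ge (PySem.Set.discard s x).length s.length with h | h
  · exact h
  · have heq : PySem.Set.discard s x = s :=
      hsub.eq_of_length (le_antisymm hsub.length_le h)
    have hmem : x ∈ PySem.Set.discard s x := by rw [heq]; exact hx
    rw [PySem.Set.mem_discard] at hmem
    exact absurd rfl hmem.2

lemma pvRB_sublist (tiers : List (String × List (String × String))) :
    ∀ snap (pending : PySem.Set String) c, List.Sublist (pvRoundB tiers snap pending c).1 pending := by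
  intro snap
  induction snap with
  | nil => intro pending c; exact List.Sublist.refl _
  | cons name rest ih =>
    intro pending c
    simp only [pvRoundB]
    split
    · exact ih pending c
    · split
      · exact (ih _ true).trans (pvDiscard_sublist pending name)
      · split
        · exact (ih _ true).trans (pvDiscard_sublist pending name)
        · exact ih pending c

lemma pvRB_true (tiers : List (String × List (String × String))) :
    ∀ snap (pending : PySem.Set String), (pvRoundB tiers snap pending true).2 = true := by
  intro snap
  induction snap with
  | nil => intro pending; rfl
  | cons name rest ih =>
    intro pending
    simp only [pvRoundB]
    split
    · exact ih pending
    · split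
      · exact ih _
      · split
        · exact ih _
        · exact ih pending

-- a round that reports no change leaves pending untouched, and every scanned tier
-- then has a nonempty parent that is still pending
lemma pvRB_false (tiers : List (String × List (String × String))) :
    ∀ snap (pending p' : PySem.Set String),
      pvRoundB tiers snap pending false = (p', false) →
      p' = pending ∧ ∀ name ∈ snap, ∀ cfg, (PySem.Dict.mk tiers).get? name = some cfg →
        ∃ q, (PySem.Dict.mk cfg).get? "inherits" = some q ∧ q ≠ "" ∧ q ∈ pending := by
  intro snap
  induction snap with
  | nil =>
    intro pending p' h
    simp only [pvRoundB, Prod.mk.injEq] at h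
    exact ⟨h.1.symm, by simp⟩
  | cons name rest ih =>
    intro pending p' h
    simp only [pvRoundB] at h
    split at h
    case _ hg =>
      obtain ⟨heq, hall⟩ := ih pending p' h
      refine ⟨heq, ?_⟩
      intro nm hnm cfg hcfg
      rcases List.mem_cons.1 hnm with rfl | hnm
      · rw [hg] at hcfg; cases hcfg
      · exact hall nm hnm cfg hcfg
    case _ cfg hg =>
      split at h
      case _ hp =>
        have htr := pvRB_true tiers rest (PySem.Set.discard pending name)
        rw [h] at htr
        exact absurd htr (by simp)
      case _ parent hp =>
        split at h
        case _ hc =>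
          have htr := pvRB_true tiers rest (PySem.Set.discard pending name)
          rw [h] at htr
          exact absurd htr (by simp)
        case _ hc =>
          obtain ⟨heq, hall⟩ := ih pending p' h
          push Not at hc
          refine ⟨heq, ?_⟩
          intro nm hnm cfg' hcfg
          rcases List.mem_cons.1 hnm with rfl | hnm
          · rw [hg] at hcfg
            cases hcfg
            refine ⟨parent, hp, hc.1, ?_⟩
            rw [← PySem.Set.contains_iff]
            cases hcb : pending.contains parent with
            | true => rfl
            | false => exact absurd hcb hc.2
          · exact hall nm hnm cfg' hcfg

-- a round that discards something strictly shrinks pending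
lemma pvRB_length (tiers : List (String × List (String × String))) :
    ∀ snap (pending p' : PySem.Set String), snap.Nodup → (∀ x ∈ snap, x ∈ pending) →
      pvRoundB tiers snap pending false = (p', true) → p'.length < pending.length := by
  intro snap
  induction snap with
  | nil => intro pending p' _ _ h; simp only [pvRoundB, Prod.mk.injEq] at h; exact absurd h.2 (by simp)
  | cons name rest ih =>
    intro pending p' hnd hsub h
    have hnm : name ∈ pending := hsub name List.mem_cons_self
    have hdisc : pvRoundB tiers rest (PySem.Set.discard pending name) true = (p', true) →
        p'.length < pending.length := by
      intro hrun
      have h1 : List.Sublist p' (PySem.Set.discard pending name) := by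
        have := pvRB_sublist tiers rest (PySem.Set.discard pending name) true
        rw [hrun] at this
        exact this
      calc p'.length ≤ (PySem.Set.discard pending name).length := h1.length_le
        _ < pending.length := pvDiscard_length_lt pending name hnm
    simp only [pvRoundB] at h
    split at h
    · exact ih pending p' hnd.of_cons (fun x hx => hsub x (List.mem_cons_of_mem _ hx)) h
    · split at h
      · exact hdisc h
      · split at h
        · exact hdisc h
        · exact ih pending p' hnd.of_cons (fun x hx => hsub x (List.mem_cons_of_mem _ hx)) h

-- the safety invariant: every tier key no longer pending has a terminating chain
def pvInv (tiers : List (String × List (String × String))) (pending : PySem.Set String) : Prop :=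
  ∀ k ∈ (PySem.Dict.mk tiers).keys, k ∉ pending → pvTerm tiers k

lemma pvInv_discard (tiers : List (String × List (String × String)))
    (pending : PySem.Set String) (name : String)
    (hinv : pvInv tiers pending) (hterm : pvTerm tiers name) :
    pvInv tiers (PySem.Set.discard pending name) := by
  intro k hk hkn
  by_cases hkeq : k = name
  · exact hkeq ▸ hterm
  · refine hinv k hk (fun hmem => hkn ?_)
    rw [PySem.Set.mem_discard]
    exact ⟨hmem, hkeq⟩

lemma pvRB_inv (tiers : List (String × List (String × String))) :
    ∀ snap (pending : PySem.Set String) c, pvInv tiers pending →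
      pvInv tiers (pvRoundB tiers snap pending c).1 := by
  intro snap
  induction snap with
  | nil => intro pending c hinv; exact hinv
  | cons name rest ih =>
    intro pending c hinv
    simp only [pvRoundB]
    split
    · exact ih pending c hinv
    case _ cfg hg =>
      split
      case _ hp =>
        have hterm : pvTerm tiers name :=
          pvTerm_of_step_none tiers (by simp [pvStep, hg, hp])
        exact ih _ true (pvInv_discard tiers pending name hinv hterm)
      case _ parent hp =>
        split
        case _ hc =>
          have hterm : pvTerm tiers name := by
            rcases hc with hc | hc
            · exact pvTerm_of_step_none tiers (by simp [pvStep, hg, hp, hc])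
            · by_cases hpe : parent = ""
              · exact pvTerm_of_step_none tiers (by simp [pvStep, hg, hp, hpe])
              · have hstep : pvStep tiers name = some parent := by simp [pvStep, hg, hp, hpe]
                have hpm : parent ∉ pending := (pvContains_eq_false_iff pending parent).1 hc
                by_cases hpk : parent ∈ (PySem.Dict.mk tiers).keys
                · exact pvTerm_back tiers hstep (hinv parent hpk hpm)
                · have hno : (PySem.Dict.mk tiers).get? parent = none :=
                    (PySem.Dict.get?_eq_none_iff_not_mem_keys _ _).2 hpk
                  exact pvTerm_back tiers hstep
                    (pvTerm_of_step_none tiers (by simp [pvStep, hno]))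
          exact ih _ true (pvInv_discard tiers pending name hinv hterm)
        case _ hc =>
          exact ih pending c hinv

lemma pvFixB_sublist (tiers : List (String × List (String × String))) :
    ∀ fuel (pending : PySem.Set String), List.Sublist (pvFixB tiers fuel pending) pending := by
  intro fuel
  induction fuel with
  | zero => intro pending; exact List.Sublist.refl _
  | succ f ih =>
    intro pending
    simp only [pvFixB]
    cases hr : pvRoundB tiers pending pending false with
    | mk p' ch =>
      have hsub : List.Sublist p' pending := by
        have := pvRB_sublist tiers pending pending false
        rw [hr] at this
        exact this
      cases ch with
      | true => exact (ih p').trans hsub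
      | false => exact hsub

lemma pvFixB_inv (tiers : List (String × List (String × String))) :
    ∀ fuel (pending : PySem.Set String), pvInv tiers pending →
      pvInv tiers (pvFixB tiers fuel pending) := by
  intro fuel
  induction fuel with
  | zero => intro pending hinv; exact hinv
  | succ f ih =>
    intro pending hinv
    simp only [pvFixB]
    cases hr : pvRoundB tiers pending pending false with
    | mk p' ch =>
      have hinv' : pvInv tiers p' := by
        have := pvRB_inv tiers pending pending false hinv
        rw [hr] at this
        exact this
      cases ch with
      | true => exact ih p' hinv'
      | false => exact hinv'

-- with fuel > |pending| the loop really reaches a fixpoint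
lemma pvFixB_fix (tiers : List (String × List (String × String))) :
    ∀ fuel (pending : PySem.Set String), pending.Nodup → pending.length < fuel →
      pvRoundB tiers (pvFixB tiers fuel pending) (pvFixB tiers fuel pending) false
        = (pvFixB tiers fuel pending, false) := by
  intro fuel
  induction fuel with
  | zero => intro pending _ hlen; omega
  | succ f ih =>
    intro pending hnd hlen
    simp only [pvFixB]
    cases hr : pvRoundB tiers pending pending false with
    | mk p' ch =>
      cases ch with
      | true =>
        have hlt : p'.length < pending.length :=
          pvRB_length tiers pending pending p' hnd (fun x hx => hx) hr
        have hnd' : p'.Nodup := by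
          have hsub : List.Sublist p' pending := by
            have := pvRB_sublist tiers pending pending false
            rw [hr] at this
            exact this
          exact hsub.nodup hnd
        exact ih p' hnd' (by omega)
      | false =>
        have heq : p' = pending := (pvRB_false tiers pending pending p' hr).1
        rw [heq]
        rw [heq] at hr
        exact hr

-- a nonempty fixpoint is closed under the inheritance step, so its members never terminate
lemma pvClosed_reach (tiers : List (String × List (String × String))) (P : PySem.Set String)
    (hcl : ∀ x ∈ P, ∃ q, pvStep tiers x = some q ∧ q ∈ P) :
    ∀ n x, x ∈ P → ∃ u, u ∈ P ∧ pvReach tiers n x = some u := by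
  intro n
  induction n with
  | zero => intro x hx; exact ⟨x, hx, rfl⟩
  | succ n ih =>
    intro x hx
    obtain ⟨q, hstep, hq⟩ := hcl x hx
    obtain ⟨u, hu, hr⟩ := ih q hq
    exact ⟨u, hu, by simp [pvReach, hstep, hr]⟩

lemma pvClosed_not_term (tiers : List (String × List (String × String))) (P : PySem.Set String)
    (hcl : ∀ x ∈ P, ∃ q, pvStep tiers x = some q ∧ q ∈ P) :
    ∀ x ∈ P, ¬ pvTerm tiers x := by
  rintro x hx ⟨n, hn⟩
  obtain ⟨u, _, hr⟩ := pvClosed_reach tiers P hcl n x hx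
  rw [hn] at hr
  cases hr

-- characterization of B's verdict
lemma pvAltB_char (tiers : List (String × List (String × String))) :
    ((pvFixB tiers ((PySem.Set.ofList (PySem.Dict.mk tiers).keys).length + 1)
        (PySem.Set.ofList (PySem.Dict.mk tiers).keys)).isEmpty = true)
      ↔ ∀ k ∈ (PySem.Dict.mk tiers).keys, pvTerm tiers k := by
  set P0 := PySem.Set.ofList (PySem.Dict.mk tiers).keys with hP0
  set P := pvFixB tiers (P0.length + 1) P0 with hP
  constructor
  · intro hemp k hk
    have hPnil : P = [] := List.isEmpty_iff.1 hemp
    have hinv0 : pvInv tiers P0 := by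
      intro k' hk' hk'n
      exact absurd ((PySem.Set.mem_ofList _ _).2 hk') hk'n
    have hinvP : pvInv tiers P := pvFixB_inv tiers (P0.length + 1) P0 hinv0
    exact hinvP k hk (by rw [hPnil]; simp)
  · intro hall
    rw [List.isEmpty_iff]
    by_contra hne
    obtain ⟨x, hx⟩ := List.exists_mem_of_ne_nil P hne
    have hfix : pvRoundB tiers P P false = (P, false) :=
      pvFixB_fix tiers (P0.length + 1) P0 (PySem.Set.nodup_ofList _) (by omega)
    have hclosed := (pvRB_false tiers P P P hfix).2
    have hsubkeys : ∀ y ∈ P, y ∈ (PySem.Dict.mk tiers).keys := by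
      intro y hy
      have hy0 : y ∈ P0 := (pvFixB_sublist tiers (P0.length + 1) P0).mem hy
      exact (PySem.Set.mem_ofList _ _).1 hy0
    have hcl : ∀ y ∈ P, ∃ q, pvStep tiers y = some q ∧ q ∈ P := by
      intro y hy
      cases hg : (PySem.Dict.mk tiers).get? y with
      | none =>
        exact absurd (hsubkeys y hy)
          (by rw [← PySem.Dict.get?_eq_none_iff_not_mem_keys]; exact hg)
      | some cfg =>
        obtain ⟨q, hq, hqne, hqmem⟩ := hclosed y hy cfg hg
        exact ⟨q, by simp [pvStep, hg, hq, hqne], hqmem⟩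
    exact pvClosed_not_term tiers P hcl x hx (hall x (hsubkeys x hx))

-- ===== VERDICT (by name: the statement is the Claim_ definition above) =====
theorem validate_tier_inheritance_spec : Claim_equal_validate_tier_inheritance := by
  intro config _
  unfold Spec_validate_tier_inheritance validate_tier_inheritance validate_tier_inheritance_alt
  set tiers := (PySem.Dict.mk config).getD "tiers" [] with htiers
  set keys := (PySem.Dict.mk tiers).keys with hkeys
  have hA := pvLoopA_char tiers keys
  have hB := pvAltB_char tiers
  rw [← hkeys] at hA hB
  show pvLoopA tiers (keys.length + 1) keys
      = (pvFixB tiers ((PySem.Set.ofList keys).length + 1) (PySem.Set.ofList keys)).isEmpty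
  by_cases hP : ∀ k ∈ keys, pvTerm tiers k
  · rw [hA.2 hP, hB.2 hP]
  · have h1 : pvLoopA tiers (keys.length + 1) keys = false :=
      Bool.eq_false_iff.2 (fun h => hP (hA.1 h))
    have h2 : (pvFixB tiers ((PySem.Set.ofList keys).length + 1) (PySem.Set.ofList keys)).isEmpty = false :=
      Bool.eq_false_iff.2 (fun h => hP (hB.1 h))
    rw [h1, h2]
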